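-- pv_equiv track=rewrite | github.com/Galaga0/FM26_Companion_App | fm26_helper_app.py | best_ip_position
-- ===== SOURCE A (Python) =====
-- PITCH_ORDER = [
--     "GK",
--     "LB", "LWB",
--     "CB",
--     "RB", "RWB",
--     "CDM",
--     "CM",
--     "LM", "LW",
--     "RM", "RW",
--     "CAM",
--     "ST",
-- ]
--
-- def position_sort_key(pos: str) -> int:
--     pos_u = (pos or "").upper()
--     return PITCH_ORDER.index(pos_u) if pos_u in PITCH_ORDER else 999
--
-- def best_ip_position(player: dict):
--     """Best IP position (tie-broken by pitch order)."""
--     pos_ratings = player.get("position_ratings") or {}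
--     if not pos_ratings:
--         return None
--     best_val = max(pos_ratings.values())
--     best_positions = [pos for pos, val in pos_ratings.items() if val == best_val]
--     best_positions.sort(key=position_sort_key)
--     return best_positions[0] if best_positions else None
-- ===== SOURCE B (Python) =====
-- PITCH_ORDER = [
--     "GK",
--     "LB", "LWB",
--     "CB",
--     "RB", "RWB",
--     "CDM",
--     "CM",
--     "LM", "LW",
--     "RM", "RW",
--     "CAM",
--     "ST",
-- ]
--
-- def position_sort_key(pos: str) -> int:
--     pos_u = (pos or "").upper()
--     return PITCH_ORDER.index(pos_u) if pos_u in PITCH_ORDER else 999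
--
-- def best_ip_position(player: dict):
--     """Best IP position (tie-broken by pitch order), single pass."""
--     pos_ratings = player.get("position_ratings") or {}
--     best = None  # (pos, val, key)
--     for pos, val in pos_ratings.items():
--         k = position_sort_key(pos)
--         if best is None or val > best[1] or (val == best[1] and k < best[2]):
--             best = (pos, val, k)
--     return best[0] if best else None
-- ===== Notes on version B (the rewrite author's own statement) =====
-- stated objective: alternative
-- what changed: Replaces the max + filter-comprehension + stable sort pipeline with a single loop over the items that maintains the running best (position, value, pitch-order key), using strict < on the key so ties keep the first position seen.
import Mathlib
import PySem

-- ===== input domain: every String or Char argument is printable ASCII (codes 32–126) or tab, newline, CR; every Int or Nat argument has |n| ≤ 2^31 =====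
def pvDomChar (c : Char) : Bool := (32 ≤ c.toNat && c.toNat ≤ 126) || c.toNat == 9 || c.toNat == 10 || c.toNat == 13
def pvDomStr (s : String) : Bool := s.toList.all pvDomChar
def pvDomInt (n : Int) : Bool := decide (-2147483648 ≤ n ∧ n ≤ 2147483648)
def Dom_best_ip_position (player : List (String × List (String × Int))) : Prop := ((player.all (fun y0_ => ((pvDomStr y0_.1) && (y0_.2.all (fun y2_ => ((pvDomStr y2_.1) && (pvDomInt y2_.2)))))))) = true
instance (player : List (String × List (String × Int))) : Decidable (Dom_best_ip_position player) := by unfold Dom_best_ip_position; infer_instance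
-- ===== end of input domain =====

-- B replaces A's max + filter + stable-sort pipeline by a single left-to-right pass
-- keeping the running best (position, value, pitch-order key); objective: alternative (same result, one pass).

-- ===== PORT A =====
def PITCH_ORDER : List String :=
  ["GK", "LB", "LWB", "CB", "RB", "RWB", "CDM", "CM", "LM", "LW", "RM", "RW", "CAM", "ST"]

def position_sort_key (pos : String) : Int :=
  -- (pos or "").upper(): for a str argument, `pos or ""` is pos itself (empty stays empty)
  let pos_u := PySem.Str.upper pos
  match PySem.List.index? PITCH_ORDER pos_u with
  | some i => (i : Int)
  | none => 999

def best_ip_position (player : List (String × List (String × Int))) : Option String :=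
  -- pos_ratings = player.get("position_ratings") or {}  (missing key or empty dict -> {})
  let pos_ratings := (List.lookup "position_ratings" player).getD []
  if pos_ratings = [] then none
  else
    match PySem.List.max? (pos_ratings.map Prod.snd) (fun v => v) with
    | none => none   -- unreachable: pos_ratings ≠ []
    | some best_val =>
      let best_positions := (pos_ratings.filter (fun p => p.2 == best_val)).map Prod.fst
      -- best_positions.sort(key=position_sort_key); return best_positions[0] if best_positions else None
      (PySem.List.sorted best_positions position_sort_key false).head?

-- ===== PORT B =====
-- one step of B's loop: adopt (pos, val, k) if no best yet, val > best val,
-- or val equal and strictly smaller pitch-order key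
def bstep (best : Option (String × Int × Int)) (p : String × Int) : Option (String × Int × Int) :=
  let k := position_sort_key p.1
  match best with
  | none => some (p.1, p.2, k)
  | some (bp, bv, bk) =>
    if p.2 > bv then some (p.1, p.2, k)
    else if p.2 = bv ∧ k < bk then some (p.1, p.2, k)
    else some (bp, bv, bk)

def best_ip_position_alt (player : List (String × List (String × Int))) : Option String :=
  let pos_ratings := (List.lookup "position_ratings" player).getD []
  -- return best[0] if best else None
  (pos_ratings.foldl bstep none).map (fun b => b.1)

-- ===== PRECONDITION & SPEC =====
def Spec_best_ip_position (player : List (String × List (String × Int))) (out : Option String) : Prop := out = best_ip_position_alt player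
instance (player : List (String × List (String × Int))) (out : Option String) : Decidable (Spec_best_ip_position player out) := by unfold Spec_best_ip_position; infer_instance

-- ===== CLAIM (what is proved, stated in full; the proofs are below) =====
def Claim_equal_best_ip_position : Prop := ∀ (player : List (String × List (String × Int))), Dom_best_ip_position player → Spec_best_ip_position player (best_ip_position player)

-- ===== LEMMAS AND PROOFS =====

-- "first element of minimal key" as a left fold (= head of the stable sort, proved below)
def pickStep (h : Option String) (x : String) : Option String :=
  match h with
  | none => some x
  | some q => if position_sort_key x < position_sort_key q then some x else some q

def pick (xs : List String) : Option String := xs.foldl pickStep none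

theorem head_insertBy (x : String) (ys : List String) :
    (PySem.List.insertBy (fun a b => decide (position_sort_key a < position_sort_key b)) x ys).head?
      = pickStep ys.head? x := by
  cases ys with
  | nil => rfl
  | cons y t =>
    simp only [PySem.List.insertBy, pickStep, List.head?]
    by_cases h : position_sort_key x < position_sort_key y <;> simp [h]

theorem head_foldl_insertBy (xs : List String) :
    ∀ acc : List String,
      (xs.foldl (fun acc x =>
        PySem.List.insertBy (fun a b => decide (position_sort_key a < position_sort_key b)) x acc) acc).head?
        = xs.foldl pickStep acc.head? := by
  induction xs with
  | nil => intro acc; rfl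
  | cons x t ih =>
    intro acc
    simp only [List.foldl_cons]
    rw [ih, head_insertBy]

theorem head_sorted (xs : List String) :
    (PySem.List.sorted xs position_sort_key false).head? = pick xs := by
  rw [PySem.List.sorted_eq_foldl_insertBy]
  simpa using head_foldl_insertBy xs []

theorem foldl_max_init_le (t : List Int) : ∀ a : Int, a ≤ t.foldl max a := by
  induction t with
  | nil => intro a; simp
  | cons x t ih =>
    intro a; simp only [List.foldl_cons]
    exact le_trans (le_max_left a x) (ih (max a x))

theorem pick_cons_cons_lt (x y : String) (xs : List String)
    (h : position_sort_key y < position_sort_key x) :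
    pick (x :: y :: xs) = pick (y :: xs) := by
  simp [pick, pickStep, h]

theorem pick_cons_cons_ge (x y : String) (xs : List String)
    (h : ¬ position_sort_key y < position_sort_key x) :
    pick (x :: y :: xs) = pick (x :: xs) := by
  simp [pick, pickStep, h]

theorem pv_filter_pos (M : Int) (x : String × Int) (l : List (String × Int)) (h : x.2 = M) :
    List.filter (fun p => p.2 == M) (x :: l) = x :: List.filter (fun p => p.2 == M) l := by
  simp [h]

theorem pv_filter_neg (M : Int) (x : String × Int) (l : List (String × Int)) (h : ¬ x.2 = M) :
    List.filter (fun p => p.2 == M) (x :: l) = List.filter (fun p => p.2 == M) l := by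
  simp [h]

-- B's loop, started on the first element, computes (max value, first maximal position of minimal key)
theorem bstep_main (t : List (String × Int)) :
    ∀ a : String × Int,
      ∃ r, t.foldl bstep (some (a.1, a.2, position_sort_key a.1))
            = some (r, (t.map Prod.snd).foldl max a.2, position_sort_key r)
        ∧ some r = pick (((a :: t).filter
            (fun p => p.2 == (t.map Prod.snd).foldl max a.2)).map Prod.fst) := by
  induction t with
  | nil =>
    intro a
    exact ⟨a.1, by simp [pick, pickStep]⟩
  | cons b t ih =>
    intro a
    by_cases h1 : b.2 > a.2
    · -- adopt b: a can never attain the maximum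
      obtain ⟨r, hfold, hpick⟩ := ih b
      have hM : (t.map Prod.snd).foldl max (max a.2 b.2)
          = (t.map Prod.snd).foldl max b.2 := by rw [max_eq_right (le_of_lt h1)]
      have hane : ¬ a.2 = (t.map Prod.snd).foldl max b.2 := by
        have := foldl_max_init_le (t.map Prod.snd) b.2
        omega
      refine ⟨r, ?_, ?_⟩
      · simp only [List.foldl_cons, List.map_cons, hM]
        rw [show bstep (some (a.1, a.2, position_sort_key a.1)) b
            = some (b.1, b.2, position_sort_key b.1) by simp [bstep, h1]]
        exact hfold
      · simp only [List.map_cons, List.foldl_cons, hM]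
        rw [pv_filter_neg _ _ _ hane]
        exact hpick
    · -- b.2 ≤ a.2
      have h1' : b.2 ≤ a.2 := by omega
      have hM : (t.map Prod.snd).foldl max (max a.2 b.2)
          = (t.map Prod.snd).foldl max a.2 := by rw [max_eq_left h1']
      by_cases h2 : b.2 = a.2 ∧ position_sort_key b.1 < position_sort_key a.1
      · -- adopt b (tie on the value, strictly smaller pitch-order key)
        obtain ⟨r, hfold, hpick⟩ := ih b
        have hv : (t.map Prod.snd).foldl max b.2 = (t.map Prod.snd).foldl max a.2 := by
          rw [show b.2 = a.2 from h2.1]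
        rw [hv] at hfold hpick
        refine ⟨r, ?_, ?_⟩
        · simp only [List.foldl_cons, List.map_cons, hM]
          rw [show bstep (some (a.1, a.2, position_sort_key a.1)) b
              = some (b.1, b.2, position_sort_key b.1) by
            simp [bstep, h1]; intro h; omega]
          exact hfold
        · simp only [List.map_cons, List.foldl_cons, hM]
          by_cases he : a.2 = (t.map Prod.snd).foldl max a.2
          · have heb : b.2 = (t.map Prod.snd).foldl max a.2 := by omega
            rw [pv_filter_pos _ _ _ he, pv_filter_pos _ _ _ heb,
              List.map_cons, List.map_cons, pick_cons_cons_lt _ _ _ h2.2]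
            rw [pv_filter_pos _ _ _ heb, List.map_cons] at hpick
            exact hpick
          · rw [pv_filter_neg _ _ _ he]
            exact hpick
      · -- keep a
        obtain ⟨r, hfold, hpick⟩ := ih a
        refine ⟨r, ?_, ?_⟩
        · simp only [List.foldl_cons, List.map_cons, hM]
          rw [show bstep (some (a.1, a.2, position_sort_key a.1)) b
              = some (a.1, a.2, position_sort_key a.1) by
            simp [bstep, h1]; intro h; exact fun hk => absurd ⟨h, hk⟩ h2]
          exact hfold
        · simp only [List.map_cons, List.foldl_cons, hM]
          by_cases he : a.2 = (t.map Prod.snd).foldl max a.2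
          · rw [pv_filter_pos _ _ _ he, List.map_cons]
            rw [pv_filter_pos _ _ _ he, List.map_cons] at hpick
            by_cases heb : b.2 = (t.map Prod.snd).foldl max a.2
            · have hk : ¬ position_sort_key b.1 < position_sort_key a.1 := by
                intro hk; exact h2 ⟨by omega, hk⟩
              rw [pv_filter_pos _ _ _ heb, List.map_cons,
                pick_cons_cons_ge _ _ _ hk]
              exact hpick
            · rw [pv_filter_neg _ _ _ heb]
              exact hpick
          · rw [pv_filter_neg _ _ _ he]
            rw [pv_filter_neg _ _ _ he] at hpick
            by_cases heb : b.2 = (t.map Prod.snd).foldl max a.2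
            · exfalso
              have := foldl_max_init_le (t.map Prod.snd) a.2
              omega
            · rw [pv_filter_neg _ _ _ heb]
              exact hpick

-- ===== VERDICT (by name: the statement is the Claim_ definition above) =====
theorem best_ip_position_spec : Claim_equal_best_ip_position := by
  intro player _
  unfold Spec_best_ip_position best_ip_position best_ip_position_alt
  cases hpr : (List.lookup "position_ratings" player).getD [] with
  | nil => simp
  | cons a t =>
    have hmax : PySem.List.max? ((a :: t).map Prod.snd) (fun v => v)
        = some ((t.map Prod.snd).foldl max a.2) := by
      simp only [List.map_cons]
      rw [PySem.List.max?_id_cons]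
    obtain ⟨r, hfold, hpick⟩ := bstep_main t a
    simp only [if_neg (List.cons_ne_nil a t), hmax, head_sorted, List.foldl_cons]
    rw [show bstep none a = some (a.1, a.2, position_sort_key a.1) from rfl, hfold]
    simp only [Option.map_some]
    exact hpick.symm
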